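-- pv_equiv track=rewrite | github.com/AIForHindustan/intraday_trading | intraday_scanner/data_pipeline.py | get_sector_for_symbol
-- ===== SOURCE A (Python) =====
-- def get_sector_for_symbol(symbol: str) -> str:
--     """Get sector for a given symbol"""
--     sector_mapping = {
--         'banking_finance': ['HDFCBANK', 'ICICIBANK', 'KOTAKBANK', 'SBIN', 'AXISBANK', 'INDUSINDBK', 'BAJFINANCE', 'BAJAJFINSV', 'HDFCLIFE', 'SBILIFE', 'HDFCAMC'],
--         'it_technology': ['TCS', 'INFY', 'WIPRO', 'TECHM', 'HCLTECH', 'LTIM'],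
--         'pharma_healthcare': ['SUNPHARMA', 'DRREDDY', 'CIPLA', 'DIVISLAB', 'APOLLOHOSP'],
--         'automobile': ['MARUTI', 'TATAMOTORS', 'EICHERMOT', 'HEROMOTOCO', 'M&M', 'BAJAJHLDNG'],
--         'energy_oil_gas': ['RELIANCE', 'ONGC', 'BPCL', 'IOC', 'GAIL'],
--         'metals_mining': ['TATASTEEL', 'JSWSTEEL', 'COALINDIA', 'HINDALCO'],
--         'fmcg_consumer': ['HINDUNILVR', 'ITC', 'NESTLEIND', 'TITAN', 'BRITANNIA', 'TATACONSUM', 'ASIANPAINT'],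
--         'infrastructure_construction': ['LT', 'ADANIPORTS'],
--         'cement': ['ULTRACEMCO', 'SHREECEM', 'GRASIM'],
--         'telecom_media': ['BHARTIARTL'],
--         'utilities': ['NTPC', 'POWERGRID', 'TATAPOWER'],
--         'chemicals': ['UPL'],
--         'diversified': ['ADANIENT', 'BAJAJHLDNG']
--     }
--
--     for sector, symbols in sector_mapping.items():
--         if symbol in symbols:
--             return sector
--     return 'general'
-- ===== SOURCE B (Python) =====
-- # Inverted index: one dict lookup instead of scanning each sector's list.
-- # Hardcoded symbol -> sector map; BAJAJHLDNG maps to 'automobile' (its first occurrence in the original mapping).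
-- _SYMBOL_TO_SECTOR = {
--     'HDFCBANK': 'banking_finance', 'ICICIBANK': 'banking_finance', 'KOTAKBANK': 'banking_finance',
--     'SBIN': 'banking_finance', 'AXISBANK': 'banking_finance', 'INDUSINDBK': 'banking_finance',
--     'BAJFINANCE': 'banking_finance', 'BAJAJFINSV': 'banking_finance', 'HDFCLIFE': 'banking_finance',
--     'SBILIFE': 'banking_finance', 'HDFCAMC': 'banking_finance',
--     'TCS': 'it_technology', 'INFY': 'it_technology', 'WIPRO': 'it_technology',
--     'TECHM': 'it_technology', 'HCLTECH': 'it_technology', 'LTIM': 'it_technology',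
--     'SUNPHARMA': 'pharma_healthcare', 'DRREDDY': 'pharma_healthcare', 'CIPLA': 'pharma_healthcare',
--     'DIVISLAB': 'pharma_healthcare', 'APOLLOHOSP': 'pharma_healthcare',
--     'MARUTI': 'automobile', 'TATAMOTORS': 'automobile', 'EICHERMOT': 'automobile',
--     'HEROMOTOCO': 'automobile', 'M&M': 'automobile', 'BAJAJHLDNG': 'automobile',
--     'RELIANCE': 'energy_oil_gas', 'ONGC': 'energy_oil_gas', 'BPCL': 'energy_oil_gas',
--     'IOC': 'energy_oil_gas', 'GAIL': 'energy_oil_gas',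
--     'TATASTEEL': 'metals_mining', 'JSWSTEEL': 'metals_mining', 'COALINDIA': 'metals_mining',
--     'HINDALCO': 'metals_mining',
--     'HINDUNILVR': 'fmcg_consumer', 'ITC': 'fmcg_consumer', 'NESTLEIND': 'fmcg_consumer',
--     'TITAN': 'fmcg_consumer', 'BRITANNIA': 'fmcg_consumer', 'TATACONSUM': 'fmcg_consumer',
--     'ASIANPAINT': 'fmcg_consumer',
--     'LT': 'infrastructure_construction', 'ADANIPORTS': 'infrastructure_construction',
--     'ULTRACEMCO': 'cement', 'SHREECEM': 'cement', 'GRASIM': 'cement',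
--     'BHARTIARTL': 'telecom_media',
--     'NTPC': 'utilities', 'POWERGRID': 'utilities', 'TATAPOWER': 'utilities',
--     'UPL': 'chemicals',
--     'ADANIENT': 'diversified',
-- }
--
-- def get_sector_for_symbol(symbol: str) -> str:
--     """Get sector for a given symbol"""
--     return _SYMBOL_TO_SECTOR.get(symbol, 'general')
-- ===== Notes on version B (the rewrite author's own statement) =====
-- stated objective: idiomatic
-- what changed: Replaces the per-sector loop with linear membership scans by a single dict.get on a hardcoded inverted symbol-to-sector map (BAJAJHLDNG kept under its first sector, 'automobile'), with 'general' as the default.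
import Mathlib
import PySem

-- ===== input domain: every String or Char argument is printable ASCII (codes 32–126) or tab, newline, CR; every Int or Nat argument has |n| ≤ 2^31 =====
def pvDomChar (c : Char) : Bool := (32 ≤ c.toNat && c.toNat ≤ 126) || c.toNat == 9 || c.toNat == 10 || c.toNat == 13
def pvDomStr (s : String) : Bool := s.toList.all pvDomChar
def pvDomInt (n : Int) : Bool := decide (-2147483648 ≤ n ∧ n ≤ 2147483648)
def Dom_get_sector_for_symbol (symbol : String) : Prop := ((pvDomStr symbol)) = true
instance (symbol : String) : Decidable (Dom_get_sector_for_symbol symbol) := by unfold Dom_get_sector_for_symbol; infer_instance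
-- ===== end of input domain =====

-- B replaces A's per-sector scan by a single lookup in a hardcoded inverted symbol→sector dict (idiomatic).

-- ===== PORT A =====
-- A's dict literal of sector → symbol list, in insertion order.
def pvSectorMapping : List (String × List String) :=
  [("banking_finance", ["HDFCBANK", "ICICIBANK", "KOTAKBANK", "SBIN", "AXISBANK", "INDUSINDBK", "BAJFINANCE", "BAJAJFINSV", "HDFCLIFE", "SBILIFE", "HDFCAMC"]),
   ("it_technology", ["TCS", "INFY", "WIPRO", "TECHM", "HCLTECH", "LTIM"]),
   ("pharma_healthcare", ["SUNPHARMA", "DRREDDY", "CIPLA", "DIVISLAB", "APOLLOHOSP"]),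
   ("automobile", ["MARUTI", "TATAMOTORS", "EICHERMOT", "HEROMOTOCO", "M&M", "BAJAJHLDNG"]),
   ("energy_oil_gas", ["RELIANCE", "ONGC", "BPCL", "IOC", "GAIL"]),
   ("metals_mining", ["TATASTEEL", "JSWSTEEL", "COALINDIA", "HINDALCO"]),
   ("fmcg_consumer", ["HINDUNILVR", "ITC", "NESTLEIND", "TITAN", "BRITANNIA", "TATACONSUM", "ASIANPAINT"]),
   ("infrastructure_construction", ["LT", "ADANIPORTS"]),
   ("cement", ["ULTRACEMCO", "SHREECEM", "GRASIM"]),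
   ("telecom_media", ["BHARTIARTL"]),
   ("utilities", ["NTPC", "POWERGRID", "TATAPOWER"]),
   ("chemicals", ["UPL"]),
   ("diversified", ["ADANIENT", "BAJAJHLDNG"])]

-- 'for sector, symbols in …: if symbol in symbols: return sector' / 'return "general"'
def pvLoopA : List (String × List String) → String → String
  | [], _ => "general"
  | (sector, symbols) :: rest, symbol =>
      if symbols.contains symbol then sector else pvLoopA rest symbol

def get_sector_for_symbol (symbol : String) : String :=
  pvLoopA pvSectorMapping symbol

-- ===== PORT B =====
-- B's hardcoded inverted dict symbol → sector (BAJAJHLDNG under 'automobile', its first occurrence).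
def pvSymbolToSector : PySem.Dict String String := PySem.Dict.mk
  [("HDFCBANK", "banking_finance"), ("ICICIBANK", "banking_finance"), ("KOTAKBANK", "banking_finance"),
   ("SBIN", "banking_finance"), ("AXISBANK", "banking_finance"), ("INDUSINDBK", "banking_finance"),
   ("BAJFINANCE", "banking_finance"), ("BAJAJFINSV", "banking_finance"), ("HDFCLIFE", "banking_finance"),
   ("SBILIFE", "banking_finance"), ("HDFCAMC", "banking_finance"),
   ("TCS", "it_technology"), ("INFY", "it_technology"), ("WIPRO", "it_technology"),
   ("TECHM", "it_technology"), ("HCLTECH", "it_technology"), ("LTIM", "it_technology"),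
   ("SUNPHARMA", "pharma_healthcare"), ("DRREDDY", "pharma_healthcare"), ("CIPLA", "pharma_healthcare"),
   ("DIVISLAB", "pharma_healthcare"), ("APOLLOHOSP", "pharma_healthcare"),
   ("MARUTI", "automobile"), ("TATAMOTORS", "automobile"), ("EICHERMOT", "automobile"),
   ("HEROMOTOCO", "automobile"), ("M&M", "automobile"), ("BAJAJHLDNG", "automobile"),
   ("RELIANCE", "energy_oil_gas"), ("ONGC", "energy_oil_gas"), ("BPCL", "energy_oil_gas"),
   ("IOC", "energy_oil_gas"), ("GAIL", "energy_oil_gas"),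
   ("TATASTEEL", "metals_mining"), ("JSWSTEEL", "metals_mining"), ("COALINDIA", "metals_mining"),
   ("HINDALCO", "metals_mining"),
   ("HINDUNILVR", "fmcg_consumer"), ("ITC", "fmcg_consumer"), ("NESTLEIND", "fmcg_consumer"),
   ("TITAN", "fmcg_consumer"), ("BRITANNIA", "fmcg_consumer"), ("TATACONSUM", "fmcg_consumer"),
   ("ASIANPAINT", "fmcg_consumer"),
   ("LT", "infrastructure_construction"), ("ADANIPORTS", "infrastructure_construction"),
   ("ULTRACEMCO", "cement"), ("SHREECEM", "cement"), ("GRASIM", "cement"),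
   ("BHARTIARTL", "telecom_media"),
   ("NTPC", "utilities"), ("POWERGRID", "utilities"), ("TATAPOWER", "utilities"),
   ("UPL", "chemicals"),
   ("ADANIENT", "diversified")]

def get_sector_for_symbol_alt (symbol : String) : String :=
  pvSymbolToSector.getD symbol "general"

-- ===== PRECONDITION & SPEC =====
def Spec_get_sector_for_symbol (symbol : String) (out : String) : Prop := out = get_sector_for_symbol_alt symbol
instance (symbol : String) (out : String) : Decidable (Spec_get_sector_for_symbol symbol out) := by unfold Spec_get_sector_for_symbol; infer_instance

-- ===== CLAIM (what is proved, stated in full; the proofs are below) =====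
def Claim_equal_get_sector_for_symbol : Prop := ∀ (symbol : String), Dom_get_sector_for_symbol symbol → Spec_get_sector_for_symbol symbol (get_sector_for_symbol symbol)

-- ===== LEMMAS AND PROOFS =====

-- ===== VERDICT (by name: the statement is the Claim_ definition above) =====
-- All symbols occurring in either table.
def pvKnownSymbols : List String := ["HDFCBANK", "ICICIBANK", "KOTAKBANK", "SBIN", "AXISBANK", "INDUSINDBK", "BAJFINANCE", "BAJAJFINSV", "HDFCLIFE", "SBILIFE", "HDFCAMC", "TCS", "INFY", "WIPRO", "TECHM", "HCLTECH", "LTIM", "SUNPHARMA", "DRREDDY", "CIPLA", "DIVISLAB", "APOLLOHOSP", "MARUTI", "TATAMOTORS", "EICHERMOT", "HEROMOTOCO", "M&M", "BAJAJHLDNG", "RELIANCE", "ONGC", "BPCL", "IOC", "GAIL", "TATASTEEL", "JSWSTEEL", "COALINDIA", "HINDALCO", "HINDUNILVR", "ITC", "NESTLEIND", "TITAN", "BRITANNIA", "TATACONSUM", "ASIANPAINT", "LT", "ADANIPORTS", "ULTRACEMCO", "SHREECEM", "GRASIM", "BHARTIARTL", "NTPC", "POWERGRID", "TATAPOWER",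 "UPL", "ADANIENT"]

theorem pvMain (s : String) : get_sector_for_symbol s = get_sector_for_symbol_alt s := by
  by_cases h : s ∈ pvKnownSymbols
  · fin_cases h <;> decide
  · simp only [pvKnownSymbols, List.mem_cons, List.not_mem_nil, or_false, not_or] at h
    obtain ⟨h1, h2, h3, h4, h5, h6, h7, h8, h9, h10, h11, h12, h13, h14, h15, h16, h17, h18, h19, h20, h21, h22, h23, h24, h25, h26, h27, h28, h29, h30, h31, h32, h33, h34, h35, h36, h37, h38, h39, h40, h41, h42, h43, h44, h45, h46, h47, h48, h49, h50, h51, h52, h53, h54, h55⟩ := h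
    simp [get_sector_for_symbol, get_sector_for_symbol_alt, pvLoopA, pvSectorMapping,
      pvSymbolToSector, PySem.Dict.getD, PySem.Dict.get?_mk_cons, List.contains_eq_mem,
      List.mem_cons, h1, Ne.symm h1, h2, Ne.symm h2, h3, Ne.symm h3, h4, Ne.symm h4, h5, Ne.symm h5, h6, Ne.symm h6, h7, Ne.symm h7, h8, Ne.symm h8, h9, Ne.symm h9, h10, Ne.symm h10, h11, Ne.symm h11, h12, Ne.symm h12, h13, Ne.symm h13, h14, Ne.symm h14, h15, Ne.symm h15, h16, Ne.symm h16, h17, Ne.symm h17, h18, Ne.symm h18, h19, Ne.symm h19, h20, Ne.symm h20, h21, Ne.symm h21, h22, Ne.symm h22, h23, Ne.symm h23, h24, Ne.symm h24, h25, Ne.symm h25, h26, Ne.symm h26, h27, Ne.symm h27, h28, Ne.symm h28, h29, Ne.symm h29, h30, Ne.symm h30, h31, Ne.symm h31, h32, Ne.symm h32, h33, Ne.symm h33, h34, Ne.symm h34, h35, Ne.symm h35, h36, Ne.symm h36, h37, Ne.symm h37, h38, Ne.symm h38, h39, Ne.symm h39, h40, Ne.symm h40, h41, Ne.symm h41, h42,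 Ne.symm h42, h43, Ne.symm h43, h44, Ne.symm h44, h45, Ne.symm h45, h46, Ne.symm h46, h47, Ne.symm h47, h48, Ne.symm h48, h49, Ne.symm h49, h50, Ne.symm h50, h51, Ne.symm h51, h52, Ne.symm h52, h53, Ne.symm h53, h54, Ne.symm h54, h55, Ne.symm h55]
    rfl

theorem get_sector_for_symbol_spec : Claim_equal_get_sector_for_symbol := by
  intro s _; exact pvMain s
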